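-- pv_equiv track=rewrite | github.com/PLSE-Lab/Python-MLAPI-expl | python_sources/kernel2b6f77de9d.py | findEnergy1
-- ===== SOURCE A (Python) =====
-- def findEnergy1(es,ans):
--     if(len(es) > 0):
--         estotal = sum(es)
--         eslen = len(es)
--         total = 0
--         for x in range(eslen +1):
--             under = list(i for i in es if i < x+1)
--             total = total + (eslen - len(under))
--             if (estotal - total == ans):
--                 return x+1
--     return 0
-- ===== SOURCE B (Python) =====
-- def findEnergy1(es, ans):
--     # Counting-histogram reformulation: one O(n) pass builds counts of
--     # min(e, n+1); suffix sums give, for each threshold t, how many elements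
--     # are >= t; then a single pass finds the first t with remaining == ans.
--     n = len(es)
--     if n == 0:
--         return 0
--     hist = {}
--     for e in es:
--         k = min(e, n + 1)
--         hist[k] = hist.get(k, 0) + 1
--     ge = {}
--     g = 0
--     for t in range(n + 1, 0, -1):
--         g += hist.get(t, 0)
--         ge[t] = g
--     f = sum(es)
--     for t in range(1, n + 2):
--         f -= ge[t]
--         if f == ans:
--             return t
--     return 0
-- ===== Notes on version B (the rewrite author's own statement) =====
-- stated objective: faster
-- what changed: A rescans the whole list with a filter for every threshold x (quadratic); B builds a histogram of min(e, n+1) in one pass, turns it into suffix tail-counts for every threshold, and finds the first threshold with remaining == ans in a single linear scan.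
import Mathlib
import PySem

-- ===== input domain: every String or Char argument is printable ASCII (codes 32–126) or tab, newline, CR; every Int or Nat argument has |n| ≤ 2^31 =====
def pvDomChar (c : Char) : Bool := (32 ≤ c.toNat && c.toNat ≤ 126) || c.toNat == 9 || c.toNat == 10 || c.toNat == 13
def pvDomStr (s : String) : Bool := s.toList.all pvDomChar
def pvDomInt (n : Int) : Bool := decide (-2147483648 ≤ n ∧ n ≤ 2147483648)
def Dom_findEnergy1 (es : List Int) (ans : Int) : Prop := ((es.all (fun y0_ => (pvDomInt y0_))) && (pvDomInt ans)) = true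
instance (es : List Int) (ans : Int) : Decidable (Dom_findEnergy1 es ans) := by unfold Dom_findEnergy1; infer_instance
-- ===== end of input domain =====

-- B replaces A's quadratic rescan (a filter of the whole list per threshold) by a
-- histogram of min(e, n+1), suffix counts and one linear scan (objective: faster, O(n^2) → O(n)).

-- ===== PORT A =====
-- the 'for x in range(eslen+1)' loop with early return
def findEnergy1Go (es : List Int) (ans estotal eslen : Int) (ts : List Int) (total : Int) : Int :=
  match ts with
  | [] => 0
  | x :: rest =>
    let under := es.filter (fun i => decide (i < x + 1))
    let total' := total + (eslen - (under.length : Int))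
    if estotal - total' = ans then x + 1 else findEnergy1Go es ans estotal eslen rest total'

def findEnergy1 (es : List Int) (ans : Int) : Int :=
  if es.length > 0 then
    findEnergy1Go es ans es.sum (es.length : Int)
      (PySem.List.pyRange 0 ((es.length : Int) + 1) 1) 0
  else 0

-- ===== PORT B =====
-- hist[k] = hist.get(k, 0) + 1  with k = min(e, n+1)
def altHist (es : List Int) (n : Int) : PySem.Dict Int Int :=
  es.foldl (fun d e => d.modify (min e (n + 1)) 0 (· + 1)) PySem.Dict.empty

-- for t in range(n+1, 0, -1): g += hist.get(t, 0); ge[t] = g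
def altGe (hist : PySem.Dict Int Int) (n : Int) : PySem.Dict Int Int × Int :=
  (PySem.List.pyRange (n + 1) 0 (-1)).foldl
    (fun (p : PySem.Dict Int Int × Int) t =>
      let g := p.2 + hist.getD t 0
      (p.1.insert t g, g)) (PySem.Dict.empty, 0)

-- for t in range(1, n+2): f -= ge[t]; if f == ans: return t
-- (ge[t] always exists for these t, so the total getD with default 0 is exact here)
def altGo (ge : PySem.Dict Int Int) (ans : Int) (ts : List Int) (f : Int) : Int :=
  match ts with
  | [] => 0
  | t :: rest =>
    let f' := f - ge.getD t 0
    if f' = ans then t else altGo ge ans rest f'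

def findEnergy1_alt (es : List Int) (ans : Int) : Int :=
  let n : Int := es.length
  if es.length = 0 then 0
  else
    let hist := altHist es n
    let ge := (altGe hist n).1
    altGo ge ans (PySem.List.pyRange 1 (n + 2) 1) es.sum

-- ===== PRECONDITION & SPEC =====
def Spec_findEnergy1 (es : List Int) (ans : Int) (out : Int) : Prop := out = findEnergy1_alt es ans
instance (es : List Int) (ans : Int) (out : Int) : Decidable (Spec_findEnergy1 es ans out) := by unfold Spec_findEnergy1; infer_instance

-- ===== CLAIM (what is proved, stated in full; the proofs are below) =====
def Claim_equal_findEnergy1 : Prop := ∀ (es : List Int) (ans : Int), Dom_findEnergy1 es ans → Spec_findEnergy1 es ans (findEnergy1 es ans)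

-- ===== LEMMAS AND PROOFS =====

-- hist is the counter of the list of clamped values
lemma altHist_getD_gen (es : List Int) (n v : Int) :
    ∀ d : PySem.Dict Int Int,
      (es.foldl (fun d e => d.modify (min e (n + 1)) 0 (· + 1)) d).getD v 0
        = d.getD v 0 + ((es.map (fun e => min e (n + 1))).count v : Int) := by
  induction es with
  | nil => intro d; simp
  | cons e es' ih =>
    intro d
    simp only [List.foldl_cons, List.map_cons]
    rw [ih, PySem.Dict.getD_modify, List.count_cons]
    by_cases h : v = min e (n + 1)
    · subst h
      rw [if_pos rfl]
      simp only [beq_self_eq_true, if_true]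
      push_cast
      ring
    · rw [if_neg h]
      have hbeq : (min e (n + 1) == v) = false :=
        beq_eq_false_iff_ne.mpr (fun hh => h hh.symm)
      simp only [hbeq]
      push_cast
      ring

lemma altHist_getD (es : List Int) (n v : Int) :
    (altHist es n).getD v 0 = ((es.map (fun e => min e (n + 1))).count v : Int) := by
  unfold altHist
  rw [altHist_getD_gen]
  simp

-- keys below t do not change ge[t]
lemma geFold_getD_lt (h : Int → Int) (t : Int) :
    ∀ (m : Nat) (d0 : PySem.Dict Int Int) (g0 : Int), (m : Int) < t →
      (((PySem.List.pyRange (m : Int) 0 (-1)).foldl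
        (fun (p : PySem.Dict Int Int × Int) s =>
          let g := p.2 + h s
          (p.1.insert s g, g)) (d0, g0)).1).getD t 0 = d0.getD t 0 := by
  intro m
  induction m with
  | zero => intro d0 g0 _; rw [PySem.List.pyRange_neg_one_eq_nil (by omega)]; simp
  | succ k ih =>
    intro d0 g0 hm
    rw [PySem.List.pyRange_neg_one_cons (by push_cast; omega)]
    simp only [List.foldl_cons]
    have : ((k : Int) + 1 - 1) = (k : Int) := by omega
    push_cast
    rw [this, ih _ _ (by push_cast at hm ⊢; omega)]
    rw [PySem.Dict.getD_insert]
    have : ¬ t = (k : Int) + 1 := by push_cast at hm; omega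
    simp [this]

-- ge[t] = g0 + Σ_{s=t}^{m} h s
lemma geFold_getD (h : Int → Int) (t : Int) (ht : 1 ≤ t) :
    ∀ (m : Nat) (d0 : PySem.Dict Int Int) (g0 : Int), t ≤ (m : Int) →
      (((PySem.List.pyRange (m : Int) 0 (-1)).foldl
        (fun (p : PySem.Dict Int Int × Int) s =>
          let g := p.2 + h s
          (p.1.insert s g, g)) (d0, g0)).1).getD t 0
      = g0 + ((PySem.List.pyRange t ((m : Int) + 1) 1).map h).sum := by
  intro m
  induction m with
  | zero => intro d0 g0 hm; omega
  | succ k ih =>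
    intro d0 g0 hm
    rw [PySem.List.pyRange_neg_one_cons (by push_cast; omega)]
    simp only [List.foldl_cons]
    have hk1 : ((k : Int) + 1 - 1) = (k : Int) := by omega
    push_cast
    rw [hk1]
    by_cases hEq : t = (k : Int) + 1
    · rw [geFold_getD_lt h t k _ _ (by omega)]
      rw [PySem.Dict.getD_insert]
      subst hEq
      rw [PySem.List.pyRange_one_singleton]
      simp
    · rw [ih _ _ (by push_cast at hm; omega)]
      have hsplit : PySem.List.pyRange t ((k : Int) + 1 + 1) 1
          = PySem.List.pyRange t ((k : Int) + 1) 1 ++ [(k : Int) + 1] := by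
        rw [PySem.List.pyRange_one_succ_right (by push_cast at hm; omega)]
      rw [hsplit]
      simp only [List.map_append, List.sum_append, List.map_cons, List.map_nil,
        List.sum_cons, List.sum_nil]
      ring

-- summing per-value counts over a range containing all values counts the tail
lemma sum_count_range (L : List Int) (t b : Int) (hb : ∀ v ∈ L, v < b) :
    ((PySem.List.pyRange t b 1).map (fun s => ((L.count s : Nat) : Int))).sum
      = (L.countP (fun v => decide (t ≤ v)) : Int) := by
  induction L with
  | nil => simp
  | cons v L' ih =>
    have hb' : ∀ w ∈ L', w < b := fun w hw => hb w (List.mem_cons_of_mem _ hw)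
    have hv : v < b := hb v (List.mem_cons_self ..)
    have hcount : ∀ s : Int, ((v :: L').count s : Int)
        = (L'.count s : Int) + (if s = v then 1 else 0) := by
      intro s
      rw [List.count_cons]
      push_cast
      split_ifs with h1 <;> simp_all
    have hmap : (PySem.List.pyRange t b 1).map (fun s => ((v :: L').count s : Int))
        = (PySem.List.pyRange t b 1).map
            (fun s => (L'.count s : Int) + (if s = v then 1 else 0)) := by
      exact List.map_congr_left (fun s _ => hcount s)
    rw [hmap, PySem.List.sum_map_add_int, ih hb']
    have hfix : (fun s : Int => if s = v then (1:Int) else 0)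
        = (fun s : Int => if decide (s = v) = true then (1:Int) else 0) := by
      funext s; simp
    have hind : ((PySem.List.pyRange t b 1).map (fun s => if s = v then (1:Int) else 0)).sum
        = if t ≤ v then 1 else 0 := by
      rw [hfix, PySem.List.sum_map_ite_one_zero]
      have hcnt : (PySem.List.pyRange t b 1).countP (fun s => decide (s = v))
          = (PySem.List.pyRange t b 1).count v := by
        apply List.countP_congr; intro s _
        by_cases h : s = v <;> simp [h]
      rw [hcnt]
      by_cases hm : t ≤ v
      · have hmem : v ∈ PySem.List.pyRange t b 1 := by
          rw [PySem.List.mem_pyRange_one]; exact ⟨hm, hv⟩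
        rw [List.count_eq_one_of_mem (PySem.List.nodup_pyRange_one t b) hmem]
        simp [hm]
      · have hmem : v ∉ PySem.List.pyRange t b 1 := by
          rw [PySem.List.mem_pyRange_one]; omega
        rw [List.count_eq_zero_of_not_mem hmem]
        simp [hm]
    rw [hind, List.countP_cons]
    split_ifs <;> simp_all <;> omega

-- |L| = |{e < t}| + |{e ≥ t}|
lemma filter_countP_len (L : List Int) (t : Int) :
    L.length = (L.filter (fun i => decide (i < t))).length
      + L.countP (fun e => decide (t ≤ e)) := by
  induction L with
  | nil => simp
  | cons a L ihL =>
    simp only [List.filter_cons, List.countP_cons, List.length_cons]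
    by_cases hc : a < t
    · rw [if_pos (by exact decide_eq_true hc), if_neg (by simp; omega)]
      simp only [List.length_cons]
      omega
    · rw [if_neg (by simpa using hc), if_pos (by simp; omega)]
      omega

-- ge[t] = (number of elements ≥ t) = n - |{e ∈ es | e < t}|, for 1 ≤ t ≤ n+1
lemma altGe_getD (es : List Int) (t : Int) (ht1 : 1 ≤ t) (ht2 : t ≤ (es.length : Int) + 1) :
    ((altGe (altHist es (es.length : Int)) (es.length : Int)).1).getD t 0
      = (es.length : Int) - ((es.filter (fun i => decide (i < t))).length : Int) := by
  unfold altGe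
  have hcast : ((es.length : Int) + 1) = ((es.length + 1 : Nat) : Int) := by push_cast; ring
  rw [hcast, geFold_getD (fun s => (altHist es (es.length : Int)).getD s 0) t ht1
      (es.length + 1) _ _ (by push_cast at ht2 ⊢; omega)]
  have hmapc : (PySem.List.pyRange t (((es.length + 1 : Nat) : Int) + 1) 1).map
        (fun s => (altHist es (es.length : Int)).getD s 0)
      = (PySem.List.pyRange t (((es.length + 1 : Nat) : Int) + 1) 1).map
        (fun s => (((es.map (fun e => min e ((es.length : Int) + 1))).count s : Nat) : Int)) := by
    exact List.map_congr_left (fun s _ => altHist_getD es (es.length : Int) s)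
  rw [hmapc, sum_count_range _ _ _ (by
    intro v hv
    simp only [List.mem_map] at hv
    obtain ⟨e, _, rfl⟩ := hv
    push_cast
    omega)]
  rw [List.countP_map]
  have hcomp : ((fun v => decide (t ≤ v)) ∘ fun e => min e ((es.length : Int) + 1))
      = (fun e => decide (t ≤ e)) := by
    funext e
    simp only [Function.comp_apply, decide_eq_decide]
    omega
  rw [hcomp]
  rw [filter_countP_len es t]
  push_cast
  ring

-- the two scans agree step for step: B's running f equals A's estotal - total
lemma loops_eq (es : List Int) (ans estotal : Int) (ge : PySem.Dict Int Int)
    (hge : ∀ t, 1 ≤ t → t ≤ (es.length : Int) + 1 →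
      ge.getD t 0 = (es.length : Int) - ((es.filter (fun i => decide (i < t))).length : Int)) :
    ∀ (k : Nat) (x total : Int), 0 ≤ x → (es.length : Int) + 1 - x ≤ (k : Int) →
      findEnergy1Go es ans estotal (es.length : Int)
          (PySem.List.pyRange x ((es.length : Int) + 1) 1) total
        = altGo ge ans (PySem.List.pyRange (x + 1) ((es.length : Int) + 2) 1)
            (estotal - total) := by
  intro k
  induction k with
  | zero =>
    intro x total hx hk
    rw [PySem.List.pyRange_one_eq_nil (by omega), PySem.List.pyRange_one_eq_nil (by omega)]
    rfl
  | succ m ih =>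
    intro x total hx hk
    by_cases hend : (es.length : Int) + 1 ≤ x
    · rw [PySem.List.pyRange_one_eq_nil (by omega), PySem.List.pyRange_one_eq_nil (by omega)]
      rfl
    · rw [PySem.List.pyRange_one_cons (a := x) (b := (es.length : Int) + 1) (by omega),
          PySem.List.pyRange_one_cons (a := x + 1) (b := (es.length : Int) + 2) (by omega)]
      simp only [findEnergy1Go, altGo]
      rw [hge (x + 1) (by omega) (by omega)]
      have harith : estotal - total - ((es.length : Int)
            - ((es.filter (fun i => decide (i < x + 1))).length : Int))
          = estotal - (total + ((es.length : Int)
            - ((es.filter (fun i => decide (i < x + 1))).length : Int))) := by ring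
      rw [harith]
      split_ifs with hcond
      · rfl
      · exact ih (x + 1)
          (total + ((es.length : Int) - ((es.filter (fun i => decide (i < x + 1))).length : Int)))
          (by omega) (by push_cast at hk ⊢; omega)

-- ===== VERDICT (by name: the statement is the Claim_ definition above) =====
theorem findEnergy1_spec : Claim_equal_findEnergy1 := by
  unfold Claim_equal_findEnergy1
  intro es ans _
  unfold Spec_findEnergy1 findEnergy1 findEnergy1_alt
  by_cases hne : es = []
  · subst hne; simp
  · have hlen : es.length > 0 := List.length_pos_of_ne_nil hne
    simp only [hlen, if_pos, List.length_eq_zero_iff]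
    rw [if_neg hne]
    have := loops_eq es ans es.sum (altGe (altHist es (es.length : Int)) (es.length : Int)).1
      (fun t h1 h2 => altGe_getD es t h1 h2)
      (es.length + 1) 0 0 le_rfl (by push_cast; omega)
    simpa using this
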